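-- pv_equiv track=rewrite | github.com/Tankel/Tic-Tac-Chec-Bot | playerNacho.py | __wasPieceMovement
-- ===== SOURCE A (Python) =====
-- def __wasPieceMovement(oldBoard, newBoard):
--     changedSquares = []
--
--     for i in range(4):
--         for j in range(4):
--             if oldBoard[i][j] != newBoard[i][j]:
--                 changedSquares.append((i, j))
--
--     if len(changedSquares) != 2:
--         return False, False
--
--     def areChangesFromCapture(row1, col1, row2, col2):
--         return (newBoard[row1][col1] == 0
--                 and oldBoard[row2][col2] != 0
--                 and newBoard[row2][col2] == oldBoard[row1][col1])
--
--     def areChangesFromMovement(row1, col1, row2, col2):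
--         return (newBoard[row1][col1] == 0
--                 and newBoard[row2][col2] == oldBoard[row1][col1])
--
--     wasMovement = (areChangesFromMovement(changedSquares[0][0], changedSquares[0][1], changedSquares[1][0], changedSquares[1][1])
--                    or areChangesFromMovement(changedSquares[1][0], changedSquares[1][1], changedSquares[0][0], changedSquares[0][1]))
--
--     wasCapture = (areChangesFromCapture(changedSquares[0][0], changedSquares[0][1], changedSquares[1][0], changedSquares[1][1])
--                   or areChangesFromCapture(changedSquares[1][0], changedSquares[1][1], changedSquares[0][0], changedSquares[0][1]))
--
--     return (wasMovement, wasCapture)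
-- ===== SOURCE B (Python) =====
-- def __wasPieceMovement(oldBoard, newBoard):
--     # Single fused classification pass: count changes and bucket each changed
--     # cell by whether it was vacated (new value 0) or received a piece; the
--     # verdict is read off the aggregates, no positions stored, no re-indexing.
--     changes = 0
--     vacated = []   # old values of changed cells that are now empty
--     arrived = []   # (old, new) values of changed cells that now hold a piece
--     for i in range(4):
--         for j in range(4):
--             o, n = oldBoard[i][j], newBoard[i][j]
--             if o != n:
--                 changes += 1
--                 if n == 0:
--                     vacated.append(o)
--                 else:
--                     arrived.append((o, n))
--     if changes != 2 or len(vacated) != 1: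
--         return False, False
--     v = vacated[0]
--     dOld, dNew = arrived[0]
--     wasMovement = dNew == v
--     return wasMovement, wasMovement and dOld != 0
-- ===== Notes on version B (the rewrite author's own statement) =====
-- stated objective: alternative
-- what changed: B replaces A's collect-changed-positions-then-re-index-and-OR-four-predicate-calls scheme by a single fused classification pass that never stores positions: each changed cell is bucketed on the fly into 'vacated' (old value) or 'arrived' (old,new value pair), and the move/capture verdict is read off these aggregates (exactly one vacated cell whose old value equals the arrived cell's new value).
import Mathlib
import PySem

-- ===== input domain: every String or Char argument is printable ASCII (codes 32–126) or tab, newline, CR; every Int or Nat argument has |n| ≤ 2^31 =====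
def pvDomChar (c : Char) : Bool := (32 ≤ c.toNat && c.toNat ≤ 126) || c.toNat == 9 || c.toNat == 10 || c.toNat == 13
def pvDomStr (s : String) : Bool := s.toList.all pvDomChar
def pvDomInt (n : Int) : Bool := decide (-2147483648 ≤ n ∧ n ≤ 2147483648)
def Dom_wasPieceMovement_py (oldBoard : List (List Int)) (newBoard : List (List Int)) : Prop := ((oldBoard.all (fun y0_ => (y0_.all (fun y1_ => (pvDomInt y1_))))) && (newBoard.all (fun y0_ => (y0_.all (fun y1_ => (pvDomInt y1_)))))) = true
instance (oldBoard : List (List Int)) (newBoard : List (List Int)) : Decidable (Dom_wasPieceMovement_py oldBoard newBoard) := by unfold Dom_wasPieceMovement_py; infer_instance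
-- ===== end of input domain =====

-- B replaces A's collect-positions-then-test-four-predicates scheme by a single fused
-- classification pass bucketing changed cells into vacated/arrived value lists; objective: alternative.


-- board[i][j]; in range under Pre_, so the defaults are never used there
def pvCell (b : List (List Int)) (i j : Int) : Int :=
  PySem.List.pyGetD (PySem.List.pyGetD b i []) j 0

-- ===== PORT A =====
-- the nested for-loops appending to changedSquares
def pvChangedA (oldBoard newBoard : List (List Int)) : List (Int × Int) :=
  (PySem.List.pyRange 0 4 1).foldl (fun acc i =>
    (PySem.List.pyRange 0 4 1).foldl (fun acc j =>
      if pvCell oldBoard i j ≠ pvCell newBoard i j then acc ++ [(i, j)] else acc) acc) []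

def pvAreChangesFromCapture (oldBoard newBoard : List (List Int)) (r1 c1 r2 c2 : Int) : Bool :=
  pvCell newBoard r1 c1 == 0 && !(pvCell oldBoard r2 c2 == 0) && pvCell newBoard r2 c2 == pvCell oldBoard r1 c1

def pvAreChangesFromMovement (oldBoard newBoard : List (List Int)) (r1 c1 r2 c2 : Int) : Bool :=
  pvCell newBoard r1 c1 == 0 && pvCell newBoard r2 c2 == pvCell oldBoard r1 c1

def wasPieceMovement_py (oldBoard : List (List Int)) (newBoard : List (List Int)) : Bool × Bool :=
  let changedSquares := pvChangedA oldBoard newBoard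
  if changedSquares.length ≠ 2 then (false, false)
  else
    let s0 := PySem.List.pyGetD changedSquares 0 (0, 0)
    let s1 := PySem.List.pyGetD changedSquares 1 (0, 0)
    let wasMovement := pvAreChangesFromMovement oldBoard newBoard s0.1 s0.2 s1.1 s1.2
                    || pvAreChangesFromMovement oldBoard newBoard s1.1 s1.2 s0.1 s0.2
    let wasCapture := pvAreChangesFromCapture oldBoard newBoard s0.1 s0.2 s1.1 s1.2
                    || pvAreChangesFromCapture oldBoard newBoard s1.1 s1.2 s0.1 s0.2
    (wasMovement, wasCapture)

-- ===== PORT B =====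
-- one classification step of B's fused pass: bump the change counter and bucket the
-- changed cell's (old, new) value pair into vacated (new = 0) or arrived (new ≠ 0)
def pvStep (s : Int × List Int × List (Int × Int)) (p : Int × Int) :
    Int × List Int × List (Int × Int) :=
  (s.1 + 1,
   if p.2 == 0 then s.2.1 ++ [p.1] else s.2.1,
   if p.2 == 0 then s.2.2 else s.2.2 ++ [(p.1, p.2)])

-- the verdict read off the aggregates ('vacated[0]' / 'arrived[0]' = head; under the
-- guard both lists are nonempty, the catch-all arm only totalizes the match)
def pvFinish (s : Int × List Int × List (Int × Int)) : Bool × Bool :=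
  if s.1 ≠ 2 ∨ s.2.1.length ≠ 1 then (false, false)
  else match s.2.1, s.2.2 with
    | v :: _, (dOld, dNew) :: _ => ((dNew == v), (dNew == v) && !(dOld == 0))
    | _, _ => (false, false)

def wasPieceMovement_py_alt (oldBoard : List (List Int)) (newBoard : List (List Int)) : Bool × Bool :=
  pvFinish ((PySem.List.pyRange 0 4 1).foldl (fun s i =>
    (PySem.List.pyRange 0 4 1).foldl (fun s j =>
      if pvCell oldBoard i j ≠ pvCell newBoard i j then
        pvStep s (pvCell oldBoard i j, pvCell newBoard i j)
      else s) s) ((0 : Int), ([] : List Int), ([] : List (Int × Int))))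

-- ===== PRECONDITION & SPEC =====
-- Pre_: both boards have at least 4 rows and each of the first 4 rows at least 4 entries;
-- outside this, Python A raises IndexError while scanning the 4x4 grid.
def Pre_wasPieceMovement_py (oldBoard : List (List Int)) (newBoard : List (List Int)) : Prop :=
  4 ≤ oldBoard.length ∧ 4 ≤ newBoard.length ∧
  (∀ r ∈ oldBoard.take 4, 4 ≤ r.length) ∧ (∀ r ∈ newBoard.take 4, 4 ≤ r.length)
instance (oldBoard : List (List Int)) (newBoard : List (List Int)) : Decidable (Pre_wasPieceMovement_py oldBoard newBoard) := by unfold Pre_wasPieceMovement_py; infer_instance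

def pvWitness_wasPieceMovement_py : List (List Int) × List (List Int) :=
  ([[0,0,0,0],[0,0,0,0],[0,0,0,0],[0,0,0,0]],
   [[0,0,0,0],[0,0,0,0],[0,0,0,0],[0,0,0,0]])

def Spec_wasPieceMovement_py (oldBoard : List (List Int)) (newBoard : List (List Int)) (out : Bool × Bool) : Prop := out = wasPieceMovement_py_alt oldBoard newBoard
instance (oldBoard : List (List Int)) (newBoard : List (List Int)) (out : Bool × Bool) : Decidable (Spec_wasPieceMovement_py oldBoard newBoard out) := by unfold Spec_wasPieceMovement_py; infer_instance

-- ===== CLAIM (what is proved, stated in full; the proofs are below) =====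
def Claim_equal_wasPieceMovement_py : Prop := ∀ (oldBoard : List (List Int)) (newBoard : List (List Int)), Dom_wasPieceMovement_py oldBoard newBoard → Pre_wasPieceMovement_py oldBoard newBoard → Spec_wasPieceMovement_py oldBoard newBoard (wasPieceMovement_py oldBoard newBoard)

-- ===== LEMMAS AND PROOFS =====

-- one row of A's collection loop equals filter-then-map
theorem pvFoldIf (old new : List (List Int)) (i : Int) (ys : List Int) (acc : List (Int × Int)) :
    ys.foldl (fun acc j =>
        if pvCell old i j ≠ pvCell new i j then acc ++ [(i, j)] else acc) acc
    = acc ++ (ys.filter (fun j => pvCell old i j ≠ pvCell new i j)).map (fun j => (i, j)) := by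
  induction ys generalizing acc with
  | nil => simp
  | cons y ys ih =>
    rw [List.foldl_cons, List.filter_cons]
    by_cases h : pvCell old i y = pvCell new i y
    · rw [if_neg (by simpa using h), ih]
      simp [h]
    · rw [if_pos h, ih]
      simp [h]

-- the flat list of changed squares, in scan order
def pvChangedL (old new : List (List Int)) : List (Int × Int) :=
  (PySem.List.pyRange 0 4 1).flatMap (fun i =>
    ((PySem.List.pyRange 0 4 1).filter
        (fun j => pvCell old i j ≠ pvCell new i j)).map (fun j => (i, j)))

theorem pvChangedA_eq (oldBoard newBoard : List (List Int)) :
    pvChangedA oldBoard newBoard = pvChangedL oldBoard newBoard := by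
  unfold pvChangedA pvChangedL
  rw [show (fun (acc : List (Int × Int)) (i : Int) => (PySem.List.pyRange 0 4 1).foldl
        (fun acc j => if pvCell oldBoard i j ≠ pvCell newBoard i j then acc ++ [(i, j)] else acc) acc)
      = (fun acc i => acc ++ ((PySem.List.pyRange 0 4 1).filter
          (fun j => pvCell oldBoard i j ≠ pvCell newBoard i j)).map (fun j => (i, j)))
    from funext fun acc => funext fun i => pvFoldIf oldBoard newBoard i _ acc,
    PySem.List.foldl_append_eq_flatMap]
  simp

-- one row of B's pass = fold of pvStep over the changed cells' value pairs
theorem pvFoldIfStep (old new : List (List Int)) (i : Int) (ys : List Int)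
    (s : Int × List Int × List (Int × Int)) :
    ys.foldl (fun s j =>
        if pvCell old i j ≠ pvCell new i j then
          pvStep s (pvCell old i j, pvCell new i j) else s) s
    = (((ys.filter (fun j => pvCell old i j ≠ pvCell new i j)).map
        (fun j => (pvCell old i j, pvCell new i j))).foldl pvStep s) := by
  induction ys generalizing s with
  | nil => simp
  | cons y ys ih =>
    rw [List.foldl_cons, List.filter_cons]
    by_cases h : pvCell old i y = pvCell new i y
    · rw [if_neg (by simpa using h), ih]
      simp [h]
    · rw [if_pos h, ih]
      simp [h]

-- folding row by row = folding over the flattened list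
theorem pvFoldlFlatMap {α β σ : Type} (st : σ → β → σ) (g : α → List β) (xs : List α) (s : σ) :
    xs.foldl (fun s i => (g i).foldl st s) s = (xs.flatMap g).foldl st s := by
  induction xs generalizing s with
  | nil => rfl
  | cons x xs ih => simp [List.foldl_append, ih]

-- B's fused pass, rewritten as a fold of pvStep over the changed squares' value pairs
theorem pvAltState (oldBoard newBoard : List (List Int)) :
    (PySem.List.pyRange 0 4 1).foldl (fun s i =>
      (PySem.List.pyRange 0 4 1).foldl (fun s j =>
        if pvCell oldBoard i j ≠ pvCell newBoard i j then
          pvStep s (pvCell oldBoard i j, pvCell newBoard i j)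
        else s) s) ((0 : Int), ([] : List Int), ([] : List (Int × Int)))
    = ((pvChangedL oldBoard newBoard).map
        (fun p => (pvCell oldBoard p.1 p.2, pvCell newBoard p.1 p.2))).foldl pvStep
        ((0 : Int), ([] : List Int), ([] : List (Int × Int))) := by
  rw [show (fun (s : Int × List Int × List (Int × Int)) (i : Int) => (PySem.List.pyRange 0 4 1).foldl
        (fun s j => if pvCell oldBoard i j ≠ pvCell newBoard i j then
          pvStep s (pvCell oldBoard i j, pvCell newBoard i j) else s) s)
      = (fun s i => (((PySem.List.pyRange 0 4 1).filter
          (fun j => pvCell oldBoard i j ≠ pvCell newBoard i j)).map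
          (fun j => (pvCell oldBoard i j, pvCell newBoard i j))).foldl pvStep s)
    from funext fun s => funext fun i => pvFoldIfStep oldBoard newBoard i _ s,
    pvFoldlFlatMap]
  unfold pvChangedL
  rw [List.map_flatMap]
  simp [List.map_map, Function.comp_def]

-- the counter component counts the processed pairs
theorem pvStepCount (ps : List (Int × Int)) (s : Int × List Int × List (Int × Int)) :
    (ps.foldl pvStep s).1 = s.1 + ps.length := by
  induction ps generalizing s with
  | nil => simp
  | cons p ps ih => simp [List.foldl_cons, ih, pvStep]; omega

-- every collected square really changed
theorem pvChangedL_mem (oldBoard newBoard : List (List Int)) (p : Int × Int)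
    (hp : p ∈ pvChangedL oldBoard newBoard) :
    pvCell oldBoard p.1 p.2 ≠ pvCell newBoard p.1 p.2 := by
  unfold pvChangedL at hp
  simp only [List.mem_flatMap, List.mem_map, List.mem_filter] at hp
  obtain ⟨i, _, j, ⟨_, hj⟩, rfl⟩ := hp
  simpa using hj

-- the boolean core: A's four OR'd predicate calls equal B's verdict from the
-- two-pair classification state, given that both squares actually changed
theorem pvCore (x1 y1 x2 y2 : Int) (h1 : x1 ≠ y1) (h2 : x2 ≠ y2) :
    (((y1 == 0 && y2 == x1) || (y2 == 0 && y1 == x2)),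
     ((y1 == 0 && !(x2 == 0) && y2 == x1) || (y2 == 0 && !(x1 == 0) && y1 == x2))) =
    pvFinish (pvStep (pvStep ((0 : Int), ([] : List Int), ([] : List (Int × Int))) (x1, y1)) (x2, y2)) := by
  by_cases e1 : y1 = 0 <;> by_cases e2 : y2 = 0 <;> by_cases e3 : y2 = x1 <;>
    by_cases e4 : y1 = x2 <;> by_cases e5 : x1 = 0 <;> by_cases e6 : x2 = 0 <;>
    simp_all [pvStep, pvFinish,
      show ∀ a b : Int, (a == b) = decide (a = b) from fun a b => rfl]

-- ===== VERDICT (by name: the statement is the Claim_ definition above) =====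
theorem wasPieceMovement_py_spec : Claim_equal_wasPieceMovement_py := by
  intro oldBoard newBoard _ _
  show wasPieceMovement_py oldBoard newBoard = wasPieceMovement_py_alt oldBoard newBoard
  unfold wasPieceMovement_py wasPieceMovement_py_alt
  rw [pvChangedA_eq, pvAltState]
  by_cases hlen : (pvChangedL oldBoard newBoard).length = 2
  · match hcs : pvChangedL oldBoard newBoard, hlen with
    | [a, b], _ =>
      have ha := pvChangedL_mem oldBoard newBoard a (hcs ▸ by simp)
      have hb := pvChangedL_mem oldBoard newBoard b (hcs ▸ by simp)
      simp only [List.length_cons, List.length_nil, List.map_cons, List.map_nil,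
        List.foldl_cons, List.foldl_nil]
      norm_num
      have := pvCore (pvCell oldBoard a.1 a.2) (pvCell newBoard a.1 a.2)
        (pvCell oldBoard b.1 b.2) (pvCell newBoard b.1 b.2) ha hb
      simpa [pvAreChangesFromMovement, pvAreChangesFromCapture,
        PySem.List.pyGetD] using this
  · have hc : (((pvChangedL oldBoard newBoard).map
        (fun p => (pvCell oldBoard p.1 p.2, pvCell newBoard p.1 p.2))).foldl pvStep
        ((0 : Int), ([] : List Int), ([] : List (Int × Int)))).1
        = ((pvChangedL oldBoard newBoard).length : Int) := by
      rw [pvStepCount]; simp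
    rw [if_pos (by simpa using hlen), pvFinish, if_pos]
    left
    rw [hc]
    omega
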